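-- pv_equiv track=rewrite | github.com/mikeyyb22/cse111 | CSE111/wk_05/provinces.py | ab_replace
-- ===== SOURCE A (Python) =====
-- def ab_replace(my_list):
--     alberta_count = 0
--     for index, value in enumerate(my_list):
--         if value == "AB":
--             my_list[index] = "Alberta"
--
--     for index, value in enumerate(my_list):
--         if value == "Alberta":
--             alberta_count += 1
--
--     return my_list, alberta_count
-- ===== SOURCE B (Python) =====
-- def ab_replace(my_list):
--     alberta_count = 0
--     for index, value in enumerate(my_list):
--         if value == "AB":
--             my_list[index] = "Alberta"
--             alberta_count += 1
--         elif value == "Alberta":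
--             alberta_count += 1
--     return my_list, alberta_count
-- ===== Notes on version B (the rewrite author's own statement) =====
-- stated objective: simpler
-- what changed: Fuses A's two separate passes (replace scan, then count scan) into a single in-place enumerate pass that replaces 'AB' and counts in the same step.
import Mathlib
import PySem

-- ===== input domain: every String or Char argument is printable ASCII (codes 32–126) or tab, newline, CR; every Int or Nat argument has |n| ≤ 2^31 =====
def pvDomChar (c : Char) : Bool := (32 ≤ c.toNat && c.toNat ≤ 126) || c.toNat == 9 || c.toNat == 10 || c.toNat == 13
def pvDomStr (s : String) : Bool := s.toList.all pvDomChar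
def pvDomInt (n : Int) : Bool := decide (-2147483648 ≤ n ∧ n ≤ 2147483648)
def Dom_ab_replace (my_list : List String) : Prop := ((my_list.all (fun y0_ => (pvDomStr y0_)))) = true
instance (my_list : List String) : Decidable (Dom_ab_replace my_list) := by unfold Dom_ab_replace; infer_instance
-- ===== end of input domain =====

-- B fuses A's two passes (replace, then count) into one in-place pass; equivalence is about the
-- return value (both Pythons mutate my_list in place identically).

-- ===== PORT A =====
-- first loop: each "AB" entry is overwritten with "Alberta" at its own index (only the current
-- element is inspected, so the in-place loop is the elementwise rewrite)
-- second loop: count "Alberta" entries, an accumulator over the rewritten list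
def ab_replace (my_list : List String) : List String × Int :=
  let replaced := my_list.map (fun value => if value == "AB" then "Alberta" else value)
  let alberta_count := replaced.foldl (fun c value => if value == "Alberta" then c + 1 else c) (0 : Int)
  (replaced, alberta_count)

-- ===== PORT B =====
-- single pass: structural recursion carrying the (rest-of-list, count) result
def ab_replace_alt (my_list : List String) : List String × Int :=
  match my_list with
  | [] => ([], 0)
  | value :: rest =>
    let r := ab_replace_alt rest
    if value == "AB" then ("Alberta" :: r.1, r.2 + 1)
    else if value == "Alberta" then (value :: r.1, r.2 + 1)
    else (value :: r.1, r.2)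

-- ===== PRECONDITION & SPEC =====
def Spec_ab_replace (my_list : List String) (out : List String × Int) : Prop := out = ab_replace_alt my_list
instance (my_list : List String) (out : List String × Int) : Decidable (Spec_ab_replace my_list out) := by unfold Spec_ab_replace; infer_instance

-- ===== CLAIM (what is proved, stated in full; the proofs are below) =====
def Claim_equal_ab_replace : Prop := ∀ (my_list : List String), Dom_ab_replace my_list → Spec_ab_replace my_list (ab_replace my_list)

-- ===== LEMMAS AND PROOFS =====

theorem ab_count_foldl_acc (l : List String) (c : Int) :
    l.foldl (fun c value => if value == "Alberta" then c + 1 else c) c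
      = c + l.foldl (fun c value => if value == "Alberta" then c + 1 else c) 0 := by
  induction l generalizing c with
  | nil => simp
  | cons v t ih =>
    simp only [List.foldl_cons]
    by_cases h : (v == "Alberta") = true
    · rw [if_pos h, if_pos h, ih (c + 1), ih (0 + 1)]; ring
    · rw [if_neg h, if_neg h]; exact ih c

theorem ab_replace_eq_alt (l : List String) : ab_replace l = ab_replace_alt l := by
  induction l with
  | nil => rfl
  | cons v t ih =>
    simp only [ab_replace, List.map_cons, List.foldl_cons] at ih ⊢
    by_cases hab : (v == "AB") = true
    · rw [if_pos hab]
      simp only [ab_replace_alt, if_pos hab]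
      rw [if_pos (by decide : (("Alberta" : String) == "Alberta") = true)]
      rw [ab_count_foldl_acc]
      rw [Prod.ext_iff] at ih ⊢; simp only at ih ⊢
      exact ⟨by rw [ih.1], by rw [ih.2]; ring⟩
    · rw [if_neg hab]
      simp only [ab_replace_alt, if_neg hab]
      by_cases hAl : (v == "Alberta") = true
      · rw [if_pos hAl, if_pos hAl, ab_count_foldl_acc]
        rw [Prod.ext_iff] at ih ⊢; simp only at ih ⊢
        exact ⟨by rw [ih.1], by rw [ih.2]; ring⟩
      · rw [if_neg hAl, if_neg hAl]
        rw [Prod.ext_iff] at ih ⊢; simp only at ih ⊢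
        exact ⟨by rw [ih.1], by rw [ih.2]⟩

-- ===== VERDICT (by name: the statement is the Claim_ definition above) =====
theorem ab_replace_spec : Claim_equal_ab_replace := by
  intro l _
  unfold Spec_ab_replace
  exact ab_replace_eq_alt l
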